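-- pv_equiv track=rewrite | github.com/L2dulgi/SIL-C | src/AppOSI/dataset/dataloader.py | split_trajectories
-- ===== SOURCE A (Python) =====
-- def split_trajectories(terminals):
--     bounds = []
--     start = 0
--     for idx, t in enumerate(terminals):
--         if t == 1:
--             bounds.append((start, idx + 1))
--             start = idx + 1
--     if start < len(terminals):
--         bounds.append((start, len(terminals)))
--     return bounds
-- ===== SOURCE B (Python) =====
-- def split_trajectories(terminals):
--     bounds = []
--     offset = 0
--     seg = terminals
--     while 1 in seg:
--         k = seg.index(1)
--         bounds.append((offset, offset + k + 1))
--         offset += k + 1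
--         seg = seg[k + 1:]
--     if seg:
--         bounds.append((offset, offset + len(seg)))
--     return bounds
-- ===== Notes on version B (the rewrite author's own statement) =====
-- stated objective: alternative
-- what changed: B never scans the flags elementwise: it repeatedly searches the remaining suffix for the next terminal with list.index, emits one interval per hit and cuts the suffix off with a slice, instead of A's single enumerate loop that tests every element and threads a start variable.
import Mathlib
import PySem

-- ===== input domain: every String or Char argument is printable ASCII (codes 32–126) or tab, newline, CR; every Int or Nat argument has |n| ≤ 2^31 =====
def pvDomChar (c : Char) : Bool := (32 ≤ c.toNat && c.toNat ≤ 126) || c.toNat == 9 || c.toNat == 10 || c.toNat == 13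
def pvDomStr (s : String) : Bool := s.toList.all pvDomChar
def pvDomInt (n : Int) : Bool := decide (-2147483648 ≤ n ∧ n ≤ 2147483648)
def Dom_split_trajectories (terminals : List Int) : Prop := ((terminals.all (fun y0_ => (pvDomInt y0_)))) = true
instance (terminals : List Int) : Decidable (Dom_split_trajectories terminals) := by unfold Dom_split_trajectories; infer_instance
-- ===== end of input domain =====

-- B replaces A's elementwise enumerate scan by repeated index-search for the next terminal with suffix slicing (objective: alternative).

-- ===== PORT A =====
-- A: single enumerate loop; at each flag==1 append (start, idx+1) and update start, final tail interval if start < len.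
def split_trajectories (terminals : List Int) : List (Int × Int) :=
  let st := (PySem.List.enumerate terminals).foldl
    (fun (st : List (Int × Int) × Int) p =>
      if p.2 == 1 then (st.1 ++ [(st.2, p.1 + 1)], p.1 + 1) else st)
    ([], 0)
  if st.2 < (terminals.length : Int) then st.1 ++ [(st.2, (terminals.length : Int))] else st.1

-- ===== PORT B =====
-- termination lemma for goB (cited by its decreasing_by)
theorem pv_slice_len_lt (seg : List Int) (k : Nat) (h : PySem.List.index? seg 1 = some k) :
    (PySem.List.slice seg (some ((k : Int) + 1)) none).length < seg.length := by
  obtain ⟨hk, -, -⟩ := PySem.List.getElem_of_index?_eq_some h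
  have hs : PySem.List.slice seg (some ((((k + 1 : Nat)) : Int))) none = seg.drop (k + 1) :=
    PySem.List.slice_from_natCast seg (k + 1)
  push_cast at hs
  rw [hs, List.length_drop]
  omega

-- B's while loop: search the remaining suffix for 1, emit an interval, slice the suffix off.
def goB (bounds : List (Int × Int)) (offset : Int) (seg : List Int) : List (Int × Int) :=
  match h : PySem.List.index? seg 1 with
  | some k =>
      goB (bounds ++ [(offset, offset + (k : Int) + 1)]) (offset + (k : Int) + 1)
          (PySem.List.slice seg (some ((k : Int) + 1)) none)
  | none => if seg ≠ [] then bounds ++ [(offset, offset + (seg.length : Int))] else bounds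
termination_by seg.length
decreasing_by exact pv_slice_len_lt seg k h

def split_trajectories_alt (terminals : List Int) : List (Int × Int) := goB [] 0 terminals

-- ===== PRECONDITION & SPEC =====
def Spec_split_trajectories (terminals : List Int) (out : List (Int × Int)) : Prop := out = split_trajectories_alt terminals
instance (terminals : List Int) (out : List (Int × Int)) : Decidable (Spec_split_trajectories terminals out) := by unfold Spec_split_trajectories; infer_instance

-- ===== CLAIM (what is proved, stated in full; the proofs are below) =====
def Claim_equal_split_trajectories : Prop := ∀ (terminals : List Int), Dom_split_trajectories terminals → Spec_split_trajectories terminals (split_trajectories terminals)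

-- ===== LEMMAS AND PROOFS =====

-- folding A's step over a stretch with no 1 leaves the state unchanged
theorem fold_no_one (pre : List Int) (h : 1 ∉ pre) (acc : List (Int × Int)) (s i : Int) :
    (PySem.List.enumerate pre i).foldl
      (fun (st : List (Int × Int) × Int) p =>
        if p.2 == 1 then (st.1 ++ [(st.2, p.1 + 1)], p.1 + 1) else st)
      (acc, s) = (acc, s) := by
  induction pre generalizing i with
  | nil => simp [PySem.List.enumerate_nil]
  | cons x xs ih =>
    rw [PySem.List.enumerate_cons, List.foldl_cons]
    have hx : ¬((x == 1) = true) := by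
      simp only [beq_iff_eq]
      intro hx; exact h (by simp [hx])
    simp only [if_neg hx]
    exact ih (fun hm => h (List.mem_cons_of_mem _ hm)) _

-- A's fold-then-final-if, started at base s with accumulated bounds, equals goB
theorem main_lemma (bounds : List (Int × Int)) (s : Int) (l : List Int) :
    (let st := (PySem.List.enumerate l s).foldl
        (fun (st : List (Int × Int) × Int) p =>
          if p.2 == 1 then (st.1 ++ [(st.2, p.1 + 1)], p.1 + 1) else st)
        (bounds, s)
     if st.2 < s + (l.length : Int) then st.1 ++ [(st.2, s + (l.length : Int))] else st.1)
    = goB bounds s l := by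
  induction bounds, s, l using goB.induct with
  | case1 bounds s l k h ih =>
    obtain ⟨pre, suf, rfl, hlen, hnot⟩ := (PySem.List.index?_eq_some_iff _ _ _).1 h
    subst hlen
    have hdrop : PySem.List.slice (pre ++ 1 :: suf) (some ((pre.length : Int) + 1)) none = suf := by
      have hs := PySem.List.slice_from_natCast (pre ++ 1 :: suf) (pre.length + 1)
      push_cast at hs
      rw [hs, show pre ++ 1 :: suf = (pre ++ [1]) ++ suf by simp]
      simp
    rw [goB, h]
    rw [PySem.List.enumerate_append, List.foldl_append, fold_no_one pre hnot,
      PySem.List.enumerate_cons, List.foldl_cons]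
    simp only [show ((1 : Int) == 1) = true from rfl, if_pos]
    rw [hdrop] at ih
    rw [hdrop, ← ih]
    have hL : s + (((pre ++ 1 :: suf).length : Nat) : Int)
        = s + (pre.length : Int) + 1 + (suf.length : Int) := by
      push_cast [List.length_append, List.length_cons]; ring
    simp only [hL]
  | case2 bounds s l h hl =>
    have hnot : 1 ∉ l := (PySem.List.index?_eq_none_iff _ _).1 h
    rw [goB, h]
    simp only [fold_no_one l hnot]
    have : 0 < l.length := List.length_pos_iff.2 hl
    rw [if_pos (by omega), if_pos hl]
  | case3 bounds s l h hl =>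
    have hl' : l = [] := not_not.1 hl
    subst hl'
    rw [goB, h]
    simp [PySem.List.enumerate_nil]

-- ===== VERDICT (by name: the statement is the Claim_ definition above) =====
theorem split_trajectories_spec : Claim_equal_split_trajectories := by
  intro terminals _
  unfold Spec_split_trajectories split_trajectories split_trajectories_alt
  have := main_lemma [] 0 terminals
  simpa using this
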